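-- pv_equiv track=rewrite | github.com/ViperJuice/Code-Index-MCP | validate_functional_features.py | analyze_scala_features
-- ===== SOURCE A (Python) =====
-- def analyze_scala_features(shard, content):
--     """Analyze advanced Scala features."""
--     features = {
--         'case_classes': 0,
--         'traits': 0,
--         'higher_order_functions': 0,
--         'pattern_matching': 0,
--         'implicits': 0,
--         'type_parameters': 0,
--         'actor_patterns': 0
--     }
--
--     for symbol in shard['symbols']:
--         if symbol.get('kind') == 'case_class':
--             features['case_classes'] += 1
--         elif symbol.get('kind') == 'trait':
--             features['traits'] += 1
--         elif symbol.get('kind') == 'implicit':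
--             features['implicits'] += 1
--         elif symbol.get('kind') == 'actor':
--             features['actor_patterns'] += 1
--
--         # Higher-order functions (methods with function parameters)
--         if symbol.get('signature'):
--             sig = symbol['signature']
--             if '=>' in sig and '(' in sig:
--                 features['higher_order_functions'] += 1
--             if '[' in sig and ']' in sig:
--                 features['type_parameters'] += 1
--
--     # Analyze content for patterns
--     content_lines = content.lower()
--     features['pattern_matching'] = content_lines.count('match ') + content_lines.count('case ')
--
--     return features
-- ===== SOURCE B (Python) =====
-- def analyze_scala_features(shard, content):
--     """Analyze advanced Scala features (one independent counting pass per feature)."""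
--     symbols = shard['symbols']
--
--     def kind_count(k):
--         return sum(s.get('kind') == k for s in symbols)
--
--     def sig_count(a, b):
--         return sum(bool(s.get('signature')) and a in s['signature'] and b in s['signature']
--                    for s in symbols)
--
--     low = content.lower()
--     return {
--         'case_classes': kind_count('case_class'),
--         'traits': kind_count('trait'),
--         'higher_order_functions': sig_count('=>', '('),
--         'pattern_matching': low.count('match ') + low.count('case '),
--         'implicits': kind_count('implicit'),
--         'type_parameters': sig_count('[', ']'),
--         'actor_patterns': kind_count('actor'),
--     }
-- ===== Notes on version B (the rewrite author's own statement) =====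
-- stated objective: alternative
-- what changed: Replaces A's single fused loop that mutates all seven counters through an elif chain with staged per-feature passes: each feature is an independent predicate counted by its own sum() scan over the symbols (correct because A's elif arms test mutually exclusive kind values and the signature checks are independent of the kind chain).
import Mathlib
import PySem

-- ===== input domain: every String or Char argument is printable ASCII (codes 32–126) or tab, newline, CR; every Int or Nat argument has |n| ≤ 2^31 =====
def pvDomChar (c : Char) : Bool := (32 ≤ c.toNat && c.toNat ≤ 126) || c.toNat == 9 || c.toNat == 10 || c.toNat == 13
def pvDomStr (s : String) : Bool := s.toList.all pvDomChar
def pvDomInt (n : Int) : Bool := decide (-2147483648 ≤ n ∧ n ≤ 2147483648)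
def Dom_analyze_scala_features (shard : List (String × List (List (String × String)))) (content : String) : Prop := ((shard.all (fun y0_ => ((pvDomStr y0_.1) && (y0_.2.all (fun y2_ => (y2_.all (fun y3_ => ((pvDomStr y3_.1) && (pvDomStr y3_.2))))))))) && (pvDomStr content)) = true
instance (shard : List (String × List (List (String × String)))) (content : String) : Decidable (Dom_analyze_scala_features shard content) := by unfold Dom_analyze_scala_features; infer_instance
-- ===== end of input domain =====

-- B replaces A's single fused loop (elif chain mutating all seven counters at once) with
-- staged per-feature passes: each feature is an independent predicate counted by its own scan
-- (objective: alternative; correct because the elif arms test mutually exclusive kind values).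

-- first-match association-list lookup = d.get(k) for a dict given as a List of pairs
def pvAssocGet? {α : Type} (d : List (String × α)) (k : String) : Option α :=
  (d.find? (fun p => p.1 == k)).map (·.2)

-- ===== PORT A =====
-- body of A's 'for symbol in shard["symbols"]' loop, acting on the features dict
def pvAStep (d : PySem.Dict String Int) (symbol : List (String × String)) : PySem.Dict String Int :=
  let d :=
    if pvAssocGet? symbol "kind" == some "case_class" then d.modify "case_classes" 0 (· + 1)
    else if pvAssocGet? symbol "kind" == some "trait" then d.modify "traits" 0 (· + 1)
    else if pvAssocGet? symbol "kind" == some "implicit" then d.modify "implicits" 0 (· + 1)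
    else if pvAssocGet? symbol "kind" == some "actor" then d.modify "actor_patterns" 0 (· + 1)
    else d
  match pvAssocGet? symbol "signature" with
  | some sig =>
      if sig ≠ "" then
        let d := if PySem.Str.isIn "=>" sig && PySem.Str.isIn "(" sig then d.modify "higher_order_functions" 0 (· + 1) else d
        if PySem.Str.isIn "[" sig && PySem.Str.isIn "]" sig then d.modify "type_parameters" 0 (· + 1) else d
      else d
  | none => d

def analyze_scala_features (shard : List (String × List (List (String × String)))) (content : String) : List (String × Int) :=
  let features : PySem.Dict String Int := PySem.Dict.mk
    [("case_classes", 0), ("traits", 0), ("higher_order_functions", 0), ("pattern_matching", 0),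
     ("implicits", 0), ("type_parameters", 0), ("actor_patterns", 0)]
  match pvAssocGet? shard "symbols" with
  | some symbols =>
      let features := symbols.foldl pvAStep features
      let content_lines := PySem.Str.lower content
      let features := features.insert "pattern_matching"
        ((PySem.Str.count content_lines "match " : Int) + (PySem.Str.count content_lines "case " : Int))
      features.items
  | none => []   -- KeyError in Python; excluded by Pre_

-- ===== PORT B =====
-- kind_count(k) = sum(s.get('kind') == k for s in symbols)
def pvKindCountB (symbols : List (List (String × String))) (k : String) : Int :=
  symbols.foldl (fun acc s => acc + (if pvAssocGet? s "kind" == some k then 1 else 0)) 0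

-- the per-symbol test of sig_count: bool(s.get('signature')) and a in s['signature'] and b in s['signature']
def pvSigPredB (a b : String) (s : List (String × String)) : Bool :=
  match pvAssocGet? s "signature" with
  | some g => g != "" && PySem.Str.isIn a g && PySem.Str.isIn b g
  | none => false

def pvSigCountB (symbols : List (List (String × String))) (a b : String) : Int :=
  symbols.foldl (fun acc s => acc + (if pvSigPredB a b s then 1 else 0)) 0

def analyze_scala_features_alt (shard : List (String × List (List (String × String)))) (content : String) : List (String × Int) :=
  match pvAssocGet? shard "symbols" with
  | some symbols =>
      let low := PySem.Str.lower content
      [("case_classes", pvKindCountB symbols "case_class"),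
       ("traits", pvKindCountB symbols "trait"),
       ("higher_order_functions", pvSigCountB symbols "=>" "("),
       ("pattern_matching", (PySem.Str.count low "match " : Int) + (PySem.Str.count low "case " : Int)),
       ("implicits", pvKindCountB symbols "implicit"),
       ("type_parameters", pvSigCountB symbols "[" "]"),
       ("actor_patterns", pvKindCountB symbols "actor")]
  | none => []

-- ===== PRECONDITION & SPEC =====
-- Pre_ excludes only shards without a 'symbols' key, on which A (and B) raise KeyError.
def Pre_analyze_scala_features (shard : List (String × List (List (String × String)))) (content : String) : Prop :=
  (pvAssocGet? shard "symbols").isSome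
instance (shard : List (String × List (List (String × String)))) (content : String) : Decidable (Pre_analyze_scala_features shard content) := by unfold Pre_analyze_scala_features; infer_instance

def pvWitness_analyze_scala_features : (List (String × List (List (String × String)))) × String :=
  ([("symbols", [[("kind", "trait")], [("kind", "case_class"), ("signature", "f[A](g: A => B)")]])], "x match case ")

def Spec_analyze_scala_features (shard : List (String × List (List (String × String)))) (content : String) (out : List (String × Int)) : Prop := out = analyze_scala_features_alt shard content
instance (shard : List (String × List (List (String × String)))) (content : String) (out : List (String × Int)) : Decidable (Spec_analyze_scala_features shard content out) := by unfold Spec_analyze_scala_features; infer_instance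

-- ===== CLAIM (what is proved, stated in full; the proofs are below) =====
def Claim_equal_analyze_scala_features : Prop := ∀ (shard : List (String × List (List (String × String)))) (content : String), Dom_analyze_scala_features shard content → Pre_analyze_scala_features shard content → Spec_analyze_scala_features shard content (analyze_scala_features shard content)

-- ===== LEMMAS AND PROOFS =====

def pvKindOf (s : List (String × String)) : Option String := pvAssocGet? s "kind"

-- s['signature'] when s.get('signature') is truthy (present and non-empty)
def pvSigOf? (s : List (String × String)) : Option String :=
  match pvAssocGet? s "signature" with
  | some g => if g ≠ "" then some g else none
  | none => none

def pvHofP (g : String) : Bool := PySem.Str.isIn "=>" g && PySem.Str.isIn "(" g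
def pvTpP (g : String) : Bool := PySem.Str.isIn "[" g && PySem.Str.isIn "]" g

theorem pvMCC (c1 c2 c3 c4 c5 c6 c7 : Int) :
    (PySem.Dict.mk [("case_classes", c1), ("traits", c2), ("higher_order_functions", c3), ("pattern_matching", c4), ("implicits", c5), ("type_parameters", c6), ("actor_patterns", c7)]).modify "case_classes" 0 (· + 1) =
    PySem.Dict.mk [("case_classes", c1 + 1), ("traits", c2), ("higher_order_functions", c3), ("pattern_matching", c4), ("implicits", c5), ("type_parameters", c6), ("actor_patterns", c7)] := rfl

theorem pvMTr (c1 c2 c3 c4 c5 c6 c7 : Int) :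
    (PySem.Dict.mk [("case_classes", c1), ("traits", c2), ("higher_order_functions", c3), ("pattern_matching", c4), ("implicits", c5), ("type_parameters", c6), ("actor_patterns", c7)]).modify "traits" 0 (· + 1) =
    PySem.Dict.mk [("case_classes", c1), ("traits", c2 + 1), ("higher_order_functions", c3), ("pattern_matching", c4), ("implicits", c5), ("type_parameters", c6), ("actor_patterns", c7)] := rfl

theorem pvMHof (c1 c2 c3 c4 c5 c6 c7 : Int) :
    (PySem.Dict.mk [("case_classes", c1), ("traits", c2), ("higher_order_functions", c3), ("pattern_matching", c4), ("implicits", c5), ("type_parameters", c6), ("actor_patterns", c7)]).modify "higher_order_functions" 0 (· + 1) =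
    PySem.Dict.mk [("case_classes", c1), ("traits", c2), ("higher_order_functions", c3 + 1), ("pattern_matching", c4), ("implicits", c5), ("type_parameters", c6), ("actor_patterns", c7)] := rfl

theorem pvMIm (c1 c2 c3 c4 c5 c6 c7 : Int) :
    (PySem.Dict.mk [("case_classes", c1), ("traits", c2), ("higher_order_functions", c3), ("pattern_matching", c4), ("implicits", c5), ("type_parameters", c6), ("actor_patterns", c7)]).modify "implicits" 0 (· + 1) =
    PySem.Dict.mk [("case_classes", c1), ("traits", c2), ("higher_order_functions", c3), ("pattern_matching", c4), ("implicits", c5 + 1), ("type_parameters", c6), ("actor_patterns", c7)] := rfl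

theorem pvMTp (c1 c2 c3 c4 c5 c6 c7 : Int) :
    (PySem.Dict.mk [("case_classes", c1), ("traits", c2), ("higher_order_functions", c3), ("pattern_matching", c4), ("implicits", c5), ("type_parameters", c6), ("actor_patterns", c7)]).modify "type_parameters" 0 (· + 1) =
    PySem.Dict.mk [("case_classes", c1), ("traits", c2), ("higher_order_functions", c3), ("pattern_matching", c4), ("implicits", c5), ("type_parameters", c6 + 1), ("actor_patterns", c7)] := rfl

theorem pvMAc (c1 c2 c3 c4 c5 c6 c7 : Int) :
    (PySem.Dict.mk [("case_classes", c1), ("traits", c2), ("higher_order_functions", c3), ("pattern_matching", c4), ("implicits", c5), ("type_parameters", c6), ("actor_patterns", c7)]).modify "actor_patterns" 0 (· + 1) =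
    PySem.Dict.mk [("case_classes", c1), ("traits", c2), ("higher_order_functions", c3), ("pattern_matching", c4), ("implicits", c5), ("type_parameters", c6), ("actor_patterns", c7 + 1)] := rfl

-- characterisation of A's loop body: the features dict after one step, for any starting counts
set_option maxHeartbeats 1000000 in
theorem pvAStep_mk (s : List (String × String)) (c1 c2 c3 c4 c5 c6 c7 : Int) :
    pvAStep (PySem.Dict.mk
      [("case_classes", c1), ("traits", c2), ("higher_order_functions", c3), ("pattern_matching", c4),
       ("implicits", c5), ("type_parameters", c6), ("actor_patterns", c7)]) s =
    PySem.Dict.mk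
      [("case_classes", c1 + (if pvKindOf s == some "case_class" then 1 else 0)),
       ("traits", c2 + (if pvKindOf s == some "trait" then 1 else 0)),
       ("higher_order_functions", c3 + (match pvSigOf? s with | some g => if pvHofP g then 1 else 0 | none => 0)),
       ("pattern_matching", c4),
       ("implicits", c5 + (if pvKindOf s == some "implicit" then 1 else 0)),
       ("type_parameters", c6 + (match pvSigOf? s with | some g => if pvTpP g then 1 else 0 | none => 0)),
       ("actor_patterns", c7 + (if pvKindOf s == some "actor" then 1 else 0))] := by
  unfold pvAStep
  rcases hsig : pvAssocGet? s "signature" with _ | g <;>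
    simp only [pvSigOf?, pvKindOf, pvHofP, pvTpP, hsig] <;>
    split_ifs <;>
    (try simp only [pvMCC, pvMTr, pvMHof, pvMIm, pvMTp, pvMAc]) <;>
    simp_all

set_option maxHeartbeats 1000000 in
theorem pvAStep_foldl (symbols : List (List (String × String))) (c1 c2 c3 c4 c5 c6 c7 : Int) :
    symbols.foldl pvAStep (PySem.Dict.mk
      [("case_classes", c1), ("traits", c2), ("higher_order_functions", c3), ("pattern_matching", c4),
       ("implicits", c5), ("type_parameters", c6), ("actor_patterns", c7)]) =
    PySem.Dict.mk
      [("case_classes", c1 + ((symbols.map pvKindOf).count (some "case_class") : Int)),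
       ("traits", c2 + ((symbols.map pvKindOf).count (some "trait") : Int)),
       ("higher_order_functions", c3 + (((symbols.filterMap pvSigOf?).countP pvHofP : Nat) : Int)),
       ("pattern_matching", c4),
       ("implicits", c5 + ((symbols.map pvKindOf).count (some "implicit") : Int)),
       ("type_parameters", c6 + (((symbols.filterMap pvSigOf?).countP pvTpP : Nat) : Int)),
       ("actor_patterns", c7 + ((symbols.map pvKindOf).count (some "actor") : Int))] := by
  induction symbols generalizing c1 c2 c3 c4 c5 c6 c7 with
  | nil => simp
  | cons s rest ih =>
      rw [List.foldl_cons, pvAStep_mk, ih]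
      rcases hs : pvSigOf? s with _ | g <;>
        simp_all [List.map_cons, List.count_cons, List.countP_cons,
                  PySem.Dict.mk.injEq] <;>
        split_ifs <;> simp_all <;> omega

-- inserting the pattern_matching total overwrites the slot in place
theorem pvInsPm (c1 c2 c3 c4 c5 c6 c7 p : Int) :
    (PySem.Dict.mk
      [("case_classes", c1), ("traits", c2), ("higher_order_functions", c3), ("pattern_matching", c4),
       ("implicits", c5), ("type_parameters", c6), ("actor_patterns", c7)]).insert "pattern_matching" p =
    PySem.Dict.mk
      [("case_classes", c1), ("traits", c2), ("higher_order_functions", c3), ("pattern_matching", p),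
       ("implicits", c5), ("type_parameters", c6), ("actor_patterns", c7)] := rfl

-- B's kind pass equals the count of that kind among the symbols' kinds
theorem pvKindCountB_eq (symbols : List (List (String × String))) (k : String) :
    pvKindCountB symbols k = ((symbols.map pvKindOf).count (some k) : Int) := by
  unfold pvKindCountB
  rw [PySem.List.foldl_add (g := fun s => if pvAssocGet? s "kind" == some k then (1 : Int) else 0)]
  rw [PySem.List.sum_map_ite_one_zero]
  simp [List.count_eq_countP, List.countP_map, pvKindOf, Function.comp_def]

-- B's signature pass equals A's countP over the truthy signatures
theorem pvSigPredB_eq_sig (a b : String) (s : List (String × String)) :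
    pvSigPredB a b s = (match pvSigOf? s with
      | some g => PySem.Str.isIn a g && PySem.Str.isIn b g
      | none => false) := by
  unfold pvSigPredB pvSigOf?
  rcases pvAssocGet? s "signature" with _ | g
  · rfl
  · by_cases hg : g = ""
    · simp [hg]
    · have h2 : (g == "") = false := beq_eq_false_iff_ne.mpr hg
      simp [hg, bne, h2]

theorem pvCountP_sig (a b : String) (symbols : List (List (String × String))) :
    symbols.countP (pvSigPredB a b) =
      (symbols.filterMap pvSigOf?).countP (fun g => PySem.Str.isIn a g && PySem.Str.isIn b g) := by
  induction symbols with
  | nil => rfl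
  | cons s rest ih =>
      have hp := pvSigPredB_eq_sig a b s
      rcases hs : pvSigOf? s with _ | g <;> rw [hs] at hp <;>
        simp only [List.countP_cons, List.filterMap_cons, hs, hp, ih] <;> simp

theorem pvSigCountB_eq (symbols : List (List (String × String))) (a b : String) :
    pvSigCountB symbols a b =
      (((symbols.filterMap pvSigOf?).countP
        (fun g => PySem.Str.isIn a g && PySem.Str.isIn b g) : Nat) : Int) := by
  unfold pvSigCountB
  rw [PySem.List.foldl_add (g := fun s => if pvSigPredB a b s then (1 : Int) else 0)]
  rw [PySem.List.sum_map_ite_one_zero]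
  simp [pvCountP_sig]

theorem analyze_scala_features_spec : Claim_equal_analyze_scala_features := by
  intro shard content hdom hpre
  unfold Spec_analyze_scala_features analyze_scala_features analyze_scala_features_alt
  rcases h : pvAssocGet? shard "symbols" with _ | symbols
  · unfold Pre_analyze_scala_features at hpre
    rw [h] at hpre
  · simp only [pvAStep_foldl, pvInsPm, pvKindCountB_eq, pvSigCountB_eq]
    simp
    refine ⟨List.countP_congr ?_, List.countP_congr ?_⟩ <;> intro g _ <;> simp [pvHofP, pvTpP]
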